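-- pv_equiv track=rewrite | github.com/pypi-data/pypi-mirror-362 | packages/fse.torii/fse_torii-1.0.43.tar.gz/fse_torii-1.0.43/torii/services/application_service.py | _insert_functions
-- ===== SOURCE A (Python) =====
-- def _insert_functions(script, functions):
--     result = ''
--
--     in_header = True
--     for line in script.splitlines():
--
--         # we look for the first line that is NOT in the header
--         if in_header:
--             strip_line = line.lstrip()
--             header_line = len(strip_line) == 0 \
--                           or strip_line.startswith('#') \
--                           or strip_line.startswith('import') \
--                           or strip_line.startswith('from')
--
--             if not header_line:
--                 # ... at the end of the header, we insert the function definitions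
--                 in_header = False
--                 result = result + functions + '\n'
--
--         # we add the lines of the original script one by one
--         result = result + line + '\n'
--
--     return result
-- ===== SOURCE B (Python) =====
-- def _insert_functions(script, functions):
--     # Build the line list, splice the functions block in front of the first
--     # non-header line (loop with break), then join each line with one '\n'.
--     lines = script.splitlines()
--     out = []
--     for i, line in enumerate(lines):
--         s = line.lstrip()
--         if s and not s.startswith(('#', 'import', 'from')):
--             out.append(functions)
--             out.extend(lines[i:])
--             break
--         out.append(line)
--     return ''.join(line + '\n' for line in out)
-- ===== Notes on version B (the rewrite author's own statement) =====
-- stated objective: simpler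
-- what changed: Replaces the flag-driven single pass that grows the result string line by line with a splice of the functions block into the line list before the first non-header line, followed by one join.
import Mathlib
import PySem

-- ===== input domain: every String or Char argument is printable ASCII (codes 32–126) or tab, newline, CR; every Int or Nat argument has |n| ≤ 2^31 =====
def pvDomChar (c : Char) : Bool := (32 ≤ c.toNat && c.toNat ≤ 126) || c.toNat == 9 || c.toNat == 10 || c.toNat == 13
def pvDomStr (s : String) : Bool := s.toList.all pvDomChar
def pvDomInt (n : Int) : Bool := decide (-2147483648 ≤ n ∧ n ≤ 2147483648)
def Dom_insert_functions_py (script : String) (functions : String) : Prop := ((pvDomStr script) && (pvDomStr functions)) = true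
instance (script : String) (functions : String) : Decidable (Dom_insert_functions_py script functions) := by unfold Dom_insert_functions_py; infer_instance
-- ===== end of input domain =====

-- B replaces A's flag-driven single pass (growing string + in_header flag) with a
-- splice of the functions block into the line list before the first non-header line, then one join; objective: simpler.

-- ===== PORT A =====
def pvStepA (functions : List Char) (acc : List Char × Bool) (line : List Char) : List Char × Bool :=
  if acc.2 then
    let strip_line := PySem.Chars.lstrip line
    let header_line := (PySem.Chars.len strip_line == 0)
      || PySem.Chars.startswith strip_line ['#']
      || PySem.Chars.startswith strip_line "import".toList
      || PySem.Chars.startswith strip_line "from".toList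
    if !header_line then
      ((acc.1 ++ functions ++ ['\n']) ++ line ++ ['\n'], false)
    else
      (acc.1 ++ line ++ ['\n'], true)
  else
    (acc.1 ++ line ++ ['\n'], false)

def insert_functions_py (script : String) (functions : String) : String :=
  String.mk ((PySem.Chars.splitlines script.toList).foldl (pvStepA functions.toList) ([], true)).1

-- ===== PORT B =====
def pvIsBody (l : List Char) : Bool :=
  let s := PySem.Chars.lstrip l
  decide (s ≠ []) && !(PySem.Chars.startswith s ['#']
    || PySem.Chars.startswith s "import".toList
    || PySem.Chars.startswith s "from".toList)

def pvSplice (functions : List Char) : List (List Char) → List (List Char)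
  | [] => []
  | l :: ls =>
    if pvIsBody l then functions :: l :: ls
    else l :: pvSplice functions ls

def insert_functions_py_alt (script : String) (functions : String) : String :=
  String.mk (((pvSplice functions.toList (PySem.Chars.splitlines script.toList)).map (· ++ ['\n'])).flatten)

-- ===== PRECONDITION & SPEC =====
def Spec_insert_functions_py (script : String) (functions : String) (out : String) : Prop := out = insert_functions_py_alt script functions
instance (script : String) (functions : String) (out : String) : Decidable (Spec_insert_functions_py script functions out) := by unfold Spec_insert_functions_py; infer_instance

-- ===== CLAIM (what is proved, stated in full; the proofs are below) =====
def Claim_equal_insert_functions_py : Prop := ∀ (script : String) (functions : String), Dom_insert_functions_py script functions → Spec_insert_functions_py script functions (insert_functions_py script functions)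

-- ===== LEMMAS AND PROOFS =====
-- flat: the join of B
def pvFlat (ls : List (List Char)) : List Char := (ls.map (· ++ ['\n'])).flatten

lemma pvFoldFalse (functions : List Char) (ls : List (List Char)) (r : List Char) :
    ls.foldl (pvStepA functions) (r, false) = (r ++ pvFlat ls, false) := by
  induction ls generalizing r with
  | nil => simp [pvFlat]
  | cons l ls ih => simp [pvStepA, ih, pvFlat]

lemma pvA_eq (l : List Char) :
    (!(PySem.Chars.len (PySem.Chars.lstrip l) == 0
      || PySem.Chars.startswith (PySem.Chars.lstrip l) ['#']
      || PySem.Chars.startswith (PySem.Chars.lstrip l) "import".toList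
      || PySem.Chars.startswith (PySem.Chars.lstrip l) "from".toList)) = pvIsBody l := by
  cases h : PySem.Chars.lstrip l with
  | nil => simp [pvIsBody, h]
  | cons c cs =>
    have hlen : ((((cs.length : Int)) + 1) == 0) = false := by
      simp only [beq_eq_false_iff_ne, ne_eq]
      omega
    simp [pvIsBody, h, PySem.Chars.len_eq, hlen]

lemma pvFoldTrue (functions : List Char) (ls : List (List Char)) (r : List Char) :
    (ls.foldl (pvStepA functions) (r, true)).1 = r ++ pvFlat (pvSplice functions ls) := by
  induction ls generalizing r with
  | nil => simp [pvSplice, pvFlat]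
  | cons l ls ih =>
    rw [List.foldl_cons]
    simp only [pvStepA]
    rw [pvA_eq]
    rcases Bool.eq_false_or_eq_true (pvIsBody l) with hb | hb <;>
      simp [pvSplice, hb, ih, pvFoldFalse, pvFlat]

-- ===== VERDICT =====
theorem insert_functions_py_spec : Claim_equal_insert_functions_py := by
  intro script functions _
  unfold Spec_insert_functions_py insert_functions_py insert_functions_py_alt
  rw [pvFoldTrue]
  simp [pvFlat]
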